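-- pv_equiv track=rewrite | github.com/ADITYA-kus/security_monitoring_system | predictive_features_code_file.py | _calculate_time_period_activity
-- ===== SOURCE A (Python) =====
-- def _calculate_time_period_activity(hourly_distribution):
--     """Calculate activity by time periods"""
--     periods = {
--         'morning': [6, 7, 8, 9, 10, 11],
--         'afternoon': [12, 13, 14, 15, 16, 17],
--         'evening': [18, 19, 20, 21],
--         'night': [22, 23, 0, 1, 2, 3, 4, 5]
--     }
--
--     period_activity = {}
--     for period, hours in periods.items():
--         period_activity[period] = sum(hourly_distribution.get(h, 0) for h in hours)
--
--     return period_activity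
-- ===== SOURCE B (Python) =====
-- def _calculate_time_period_activity(hourly_distribution):
--     """Calculate activity by time periods (single pass with range classification)"""
--     morning = afternoon = evening = night = 0
--     for hour, count in hourly_distribution.items():
--         if 6 <= hour <= 11:
--             morning += count
--         elif 12 <= hour <= 17:
--             afternoon += count
--         elif 18 <= hour <= 21:
--             evening += count
--         elif 0 <= hour <= 5 or hour == 22 or hour == 23:
--             night += count
--     return {'morning': morning, 'afternoon': afternoon,
--             'evening': evening, 'night': night}
-- ===== Notes on version B (the rewrite author's own statement) =====
-- stated objective: alternative
-- what changed: Instead of four inner generator-sums each probing the dict with .get over a fixed hour list, B makes one pass over hourly_distribution.items(), classifying each hour by range comparisons into four integer counters and building the result dict once at the end.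
import Mathlib
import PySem

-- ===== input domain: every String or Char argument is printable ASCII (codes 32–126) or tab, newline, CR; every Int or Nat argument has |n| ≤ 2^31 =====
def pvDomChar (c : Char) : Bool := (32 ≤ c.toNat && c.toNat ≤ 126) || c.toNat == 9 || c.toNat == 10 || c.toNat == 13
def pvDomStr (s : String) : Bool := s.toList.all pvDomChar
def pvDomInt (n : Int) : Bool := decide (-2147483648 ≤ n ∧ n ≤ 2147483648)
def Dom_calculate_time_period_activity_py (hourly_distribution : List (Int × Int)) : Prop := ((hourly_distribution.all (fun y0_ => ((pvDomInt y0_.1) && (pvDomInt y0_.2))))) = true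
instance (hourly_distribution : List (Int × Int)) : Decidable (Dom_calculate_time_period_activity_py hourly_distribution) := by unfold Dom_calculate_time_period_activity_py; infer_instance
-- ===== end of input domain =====

-- B replaces A's four generator-sums over fixed hour lists (each probing the dict with .get)
-- by a single pass over the items with range-comparison classification into four counters.

-- ===== PORT A =====
def calculate_time_period_activity_py (hourly_distribution : List (Int × Int)) : List (String × Int) :=
  let periods : List (String × List Int) :=
    [("morning", [6, 7, 8, 9, 10, 11]),
     ("afternoon", [12, 13, 14, 15, 16, 17]),
     ("evening", [18, 19, 20, 21]),
     ("night", [22, 23, 0, 1, 2, 3, 4, 5])]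
  let period_activity : PySem.Dict String Int :=
    periods.foldl (fun d ph =>
      d.insert ph.1 ((ph.2.map (fun h => (PySem.Dict.mk hourly_distribution).getD h 0)).sum))
      PySem.Dict.empty
  period_activity.items

-- ===== PORT B =====
def calculate_time_period_activity_py_alt (hourly_distribution : List (Int × Int)) : List (String × Int) :=
  let st : Int × Int × Int × Int :=
    hourly_distribution.foldl (fun s kv =>
      if 6 ≤ kv.1 ∧ kv.1 ≤ 11 then (s.1 + kv.2, s.2.1, s.2.2.1, s.2.2.2)
      else if 12 ≤ kv.1 ∧ kv.1 ≤ 17 then (s.1, s.2.1 + kv.2, s.2.2.1, s.2.2.2)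
      else if 18 ≤ kv.1 ∧ kv.1 ≤ 21 then (s.1, s.2.1, s.2.2.1 + kv.2, s.2.2.2)
      else if (0 ≤ kv.1 ∧ kv.1 ≤ 5) ∨ kv.1 = 22 ∨ kv.1 = 23 then (s.1, s.2.1, s.2.2.1, s.2.2.2 + kv.2)
      else s) (0, 0, 0, 0)
  [("morning", st.1), ("afternoon", st.2.1), ("evening", st.2.2.1), ("night", st.2.2.2)]

-- ===== PRECONDITION & SPEC =====
-- The assoc list stands for a Python dict, whose keys are necessarily distinct; on a
-- duplicate-key list (which no dict produces) first-match lookup and a full pass differ.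
def Pre_calculate_time_period_activity_py (hourly_distribution : List (Int × Int)) : Prop :=
  (hourly_distribution.map Prod.fst).Nodup
instance (hourly_distribution : List (Int × Int)) : Decidable (Pre_calculate_time_period_activity_py hourly_distribution) := by unfold Pre_calculate_time_period_activity_py; infer_instance
def pvWitness_calculate_time_period_activity_py : (List (Int × Int)) := [(0, 3), (7, 2), (13, 5), (19, 1), (22, 4), (30, 9)]

def Spec_calculate_time_period_activity_py (hourly_distribution : List (Int × Int)) (out : List (String × Int)) : Prop := out = calculate_time_period_activity_py_alt hourly_distribution
instance (hourly_distribution : List (Int × Int)) (out : List (String × Int)) : Decidable (Spec_calculate_time_period_activity_py hourly_distribution out) := by unfold Spec_calculate_time_period_activity_py; infer_instance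

-- ===== CLAIM (what is proved, stated in full; the proofs are below) =====
def Claim_equal_calculate_time_period_activity_py : Prop := ∀ (hourly_distribution : List (Int × Int)), Dom_calculate_time_period_activity_py hourly_distribution → Pre_calculate_time_period_activity_py hourly_distribution → Spec_calculate_time_period_activity_py hourly_distribution (calculate_time_period_activity_py hourly_distribution)

-- ===== LEMMAS AND PROOFS =====

-- A's per-period sum over a fixed hour list
def pvS (hours : List Int) (l : List (Int × Int)) : Int :=
  (hours.map (fun h => (PySem.Dict.mk l).getD h 0)).sum

-- membership-filtered sum over the items
def pvT (p : Int → Prop) [DecidablePred p] (l : List (Int × Int)) : Int :=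
  (l.map (fun kv => if p kv.1 then kv.2 else 0)).sum

theorem pv_getD_nil (k : Int) : (PySem.Dict.mk ([] : List (Int × Int))).getD k 0 = 0 := rfl

theorem pv_getD_zero (l : List (Int × Int)) (k : Int)
    (h : k ∉ l.map Prod.fst) : (PySem.Dict.mk l).getD k 0 = 0 := by
  induction l with
  | nil => rfl
  | cons kv rest ih =>
    simp only [List.map_cons, List.mem_cons] at h
    push Not at h
    rw [PySem.Dict.getD_eq_get?_getD, PySem.Dict.get?_mk_cons]
    have : (kv.1 == k) = false := by simp [h.1.symm]
    rw [this]
    simp only [if_neg Bool.false_ne_true]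
    rw [← PySem.Dict.getD_eq_get?_getD]
    exact ih h.2

theorem pv_S_cons (hours : List Int) (k v : Int) (l : List (Int × Int))
    (hn : hours.Nodup) (hk : k ∉ l.map Prod.fst) :
    pvS hours ((k, v) :: l) = (if k ∈ hours then v else 0) + pvS hours l := by
  induction hours with
  | nil => simp [pvS]
  | cons h hs ih =>
    have hn' : hs.Nodup := hn.of_cons
    by_cases hk' : h = k
    · subst hk'
      have hnot : h ∉ hs := (List.nodup_cons.mp hn).1
      simp only [pvS, List.map_cons, List.sum_cons, List.mem_cons] at *
      rw [PySem.Dict.getD_eq_get?_getD, PySem.Dict.get?_mk_cons]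
      simp only [BEq.rfl]
      have := ih hn'
      rw [this, if_neg hnot, pv_getD_zero l h hk]
      simp
    · simp only [pvS, List.map_cons, List.sum_cons, List.mem_cons] at *
      rw [PySem.Dict.getD_eq_get?_getD, PySem.Dict.get?_mk_cons]
      have hb : (k == h) = false := by
        rw [beq_eq_false_iff_ne]; exact fun hh => hk' hh.symm
      rw [hb]
      simp only [if_neg Bool.false_ne_true, ← PySem.Dict.getD_eq_get?_getD]
      have := ih hn'
      rw [this]
      by_cases hmem : k ∈ hs <;> simp [hmem]
      · ring
      · omega

theorem pv_S_eq_T (hours : List Int) (hn : hours.Nodup) (l : List (Int × Int))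
    (hl : (l.map Prod.fst).Nodup) :
    pvS hours l = pvT (fun k => k ∈ hours) l := by
  induction l with
  | nil => simp [pvS, pvT, pv_getD_nil]
  | cons kv rest ih =>
    simp only [List.map_cons, List.nodup_cons] at hl
    have : pvS hours (kv :: rest) = pvS hours ((kv.1, kv.2) :: rest) := by rfl
    rw [this, pv_S_cons hours kv.1 kv.2 rest hn hl.1, ih hl.2]
    simp [pvT]

-- B's fold computes the four filtered sums
theorem pv_B_fold (l : List (Int × Int)) (m a e n : Int) :
    l.foldl (fun s kv =>
      if 6 ≤ kv.1 ∧ kv.1 ≤ 11 then (s.1 + kv.2, s.2.1, s.2.2.1, s.2.2.2)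
      else if 12 ≤ kv.1 ∧ kv.1 ≤ 17 then (s.1, s.2.1 + kv.2, s.2.2.1, s.2.2.2)
      else if 18 ≤ kv.1 ∧ kv.1 ≤ 21 then (s.1, s.2.1, s.2.2.1 + kv.2, s.2.2.2)
      else if (0 ≤ kv.1 ∧ kv.1 ≤ 5) ∨ kv.1 = 22 ∨ kv.1 = 23 then (s.1, s.2.1, s.2.2.1, s.2.2.2 + kv.2)
      else s) ((m, a, e, n) : Int × Int × Int × Int)
    = (m + pvT (fun k => 6 ≤ k ∧ k ≤ 11) l,
       a + pvT (fun k => ¬(6 ≤ k ∧ k ≤ 11) ∧ 12 ≤ k ∧ k ≤ 17) l,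
       e + pvT (fun k => ¬(6 ≤ k ∧ k ≤ 11) ∧ ¬(12 ≤ k ∧ k ≤ 17) ∧ 18 ≤ k ∧ k ≤ 21) l,
       n + pvT (fun k => ¬(6 ≤ k ∧ k ≤ 11) ∧ ¬(12 ≤ k ∧ k ≤ 17) ∧ ¬(18 ≤ k ∧ k ≤ 21) ∧ ((0 ≤ k ∧ k ≤ 5) ∨ k = 22 ∨ k = 23)) l) := by
  induction l generalizing m a e n with
  | nil => simp [pvT]
  | cons kv rest ih =>
    simp only [List.foldl_cons]
    split_ifs with h1 h2 h3 h4 <;> rw [ih] <;>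
      simp only [pvT, List.map_cons, List.sum_cons, Prod.mk.injEq] <;>
      refine ⟨?_, ?_, ?_, ?_⟩ <;> split_ifs <;> omega

theorem pv_T_mem_morning (l : List (Int × Int)) :
    pvT (fun k => k ∈ ([6, 7, 8, 9, 10, 11] : List Int)) l = pvT (fun k => 6 ≤ k ∧ k ≤ 11) l := by
  unfold pvT; congr 1; apply List.map_congr_left; intro kv _
  by_cases h : 6 ≤ kv.1 ∧ kv.1 ≤ 11 <;> [skip; skip] <;>
    simp only [List.mem_cons, List.not_mem_nil, or_false] <;> split_ifs <;> first | rfl | omega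

theorem pv_T_mem_afternoon (l : List (Int × Int)) :
    pvT (fun k => k ∈ ([12, 13, 14, 15, 16, 17] : List Int)) l
      = pvT (fun k => ¬(6 ≤ k ∧ k ≤ 11) ∧ 12 ≤ k ∧ k ≤ 17) l := by
  unfold pvT; congr 1; apply List.map_congr_left; intro kv _
  simp only [List.mem_cons, List.not_mem_nil, or_false]; split_ifs <;> first | rfl | omega

theorem pv_T_mem_evening (l : List (Int × Int)) :
    pvT (fun k => k ∈ ([18, 19, 20, 21] : List Int)) l
      = pvT (fun k => ¬(6 ≤ k ∧ k ≤ 11) ∧ ¬(12 ≤ k ∧ k ≤ 17) ∧ 18 ≤ k ∧ k ≤ 21) l := by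
  unfold pvT; congr 1; apply List.map_congr_left; intro kv _
  simp only [List.mem_cons, List.not_mem_nil, or_false]; split_ifs <;> first | rfl | omega

theorem pv_T_mem_night (l : List (Int × Int)) :
    pvT (fun k => k ∈ ([22, 23, 0, 1, 2, 3, 4, 5] : List Int)) l
      = pvT (fun k => ¬(6 ≤ k ∧ k ≤ 11) ∧ ¬(12 ≤ k ∧ k ≤ 17) ∧ ¬(18 ≤ k ∧ k ≤ 21) ∧ ((0 ≤ k ∧ k ≤ 5) ∨ k = 22 ∨ k = 23)) l := by
  unfold pvT; congr 1; apply List.map_congr_left; intro kv _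
  simp only [List.mem_cons, List.not_mem_nil, or_false]; split_ifs <;> first | rfl | omega

theorem pv_A_eq (l : List (Int × Int)) :
    calculate_time_period_activity_py l
      = [("morning", pvS [6, 7, 8, 9, 10, 11] l),
         ("afternoon", pvS [12, 13, 14, 15, 16, 17] l),
         ("evening", pvS [18, 19, 20, 21] l),
         ("night", pvS [22, 23, 0, 1, 2, 3, 4, 5] l)] := by
  rfl

-- ===== VERDICT (by name: the statement is the Claim_ definition above) =====
theorem calculate_time_period_activity_py_spec : Claim_equal_calculate_time_period_activity_py := by
  intro l _ hpre
  unfold Spec_calculate_time_period_activity_py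
  rw [pv_A_eq]
  unfold calculate_time_period_activity_py_alt
  rw [pv_B_fold]
  have hm := pv_S_eq_T [6, 7, 8, 9, 10, 11] (by decide) l hpre
  have ha := pv_S_eq_T [12, 13, 14, 15, 16, 17] (by decide) l hpre
  have he := pv_S_eq_T [18, 19, 20, 21] (by decide) l hpre
  have hn := pv_S_eq_T [22, 23, 0, 1, 2, 3, 4, 5] (by decide) l hpre
  rw [hm, ha, he, hn, pv_T_mem_morning, pv_T_mem_afternoon, pv_T_mem_evening, pv_T_mem_night]
  simp
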